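-- pv_equiv track=rewrite | github.com/L273/Cryptology- | MD5/MD5项目文件/MD5项目文件/MD5.py | re_hash
-- ===== SOURCE A (Python) =====
-- def re_hash(hash):
--     #因为是小端存储，返回的时候，要再度使用reverse，以便人的读取
--     j=0
--     re_hash=""
--     for i in hash:
--         while(i!=0):
--             j = j + i%256;
--             j=j<<8;
--             i=i>>8;
--         j=j>>8
--         re_hash = re_hash + str(hex(j)).strip('0x')
--         j=0
--     return re_hash
-- ===== SOURCE B (Python) =====
-- def re_hash(hash):
--     out = ""
--     for i in hash:
--         nbytes = (i.bit_length() + 7) // 8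
--         j = int.from_bytes(i.to_bytes(nbytes, 'little'), 'big')
--         out += hex(j).strip('0x')
--     return out
-- ===== Notes on version B (the rewrite author's own statement) =====
-- stated objective: idiomatic
-- what changed: A's inner while-loop that shuffles each word byte-by-byte through a shifting accumulator is replaced by the idiomatic closed-form byte reversal int.from_bytes(i.to_bytes((i.bit_length()+7)//8, 'little'), 'big'); the lossy hex(j).strip('0x') concatenation is kept.
import Mathlib
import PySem

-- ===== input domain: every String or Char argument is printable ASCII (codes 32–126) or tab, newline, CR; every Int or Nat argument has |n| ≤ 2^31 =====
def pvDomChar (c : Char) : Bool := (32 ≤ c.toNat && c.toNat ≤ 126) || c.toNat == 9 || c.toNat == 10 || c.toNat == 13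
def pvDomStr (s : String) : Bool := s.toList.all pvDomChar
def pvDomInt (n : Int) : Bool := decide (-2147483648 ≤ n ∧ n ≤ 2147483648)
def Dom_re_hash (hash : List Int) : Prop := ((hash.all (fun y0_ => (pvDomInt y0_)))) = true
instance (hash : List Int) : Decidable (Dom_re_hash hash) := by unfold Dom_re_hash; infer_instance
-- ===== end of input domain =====

-- B replaces A's inner byte-shuffling while-loop by the idiomatic byte reversal
-- int.from_bytes(i.to_bytes(nbytes,'little'),'big'); same lossy hex(j).strip('0x') tail.
-- (Both ports concatenate via List Char and String.ofList once at the end — exact, since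
-- Python string + on these ASCII hex pieces is list append on the code points.)

-- hex(j) for 0 ≤ j, as a list of code points ("0x" then lowercase hex digits);
-- hand-ported (PySem has no hex()); exact for nonnegative j, the only values reaching it here.
def pvHexDigit (n : Nat) : Char := "0123456789abcdef".toList.getD n '0'

def pvHexChars : Nat → List Char
  | 0 => []
  | n+1 => pvHexChars ((n+1)/16) ++ [pvHexDigit ((n+1)%16)]
decreasing_by exact Nat.div_lt_self (Nat.succ_pos n) (by norm_num)

def pvHex (j : Int) : List Char :=
  '0' :: 'x' :: (if j = 0 then ['0'] else pvHexChars j.toNat)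

-- ===== PORT A =====
-- the while-loop: while i != 0: j = j + i % 256; j = j << 8; i = i >> 8
-- (fuel-bounded; the Python loop runs at most natAbs i steps for 0 ≤ i, so fuel natAbs i + 1 is exact there)
def pvLoopA : Nat → Int → Int → Int
  | 0, _, j => j
  | f+1, i, j => if i ≠ 0 then pvLoopA f (i >>> (8:Nat)) ((j + PySem.Int.mod i 256) <<< (8:Nat)) else j

def re_hash (hash : List Int) : String :=
  String.ofList (hash.foldl (fun acc i =>
      let j := pvLoopA (i.natAbs + 1) i 0
      acc ++ PySem.Chars.stripChars (pvHex (j >>> (8:Nat))) ['0','x']) [])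

-- ===== PORT B =====
-- i.to_bytes(n, 'little') as the list of byte values (low byte first)
def pvBytesLE : Int → Nat → List Int
  | _, 0 => []
  | i, n+1 => PySem.Int.mod i 256 :: pvBytesLE (PySem.Int.floordiv i 256) n

def re_hash_alt (hash : List Int) : String :=
  String.ofList (hash.foldl (fun acc i =>
      let nbytes := (PySem.Int.bitLength i + 7) / 8
      -- int.from_bytes(bytes, 'big'): Horner fold, first byte most significant
      let j := (pvBytesLE i nbytes).foldl (fun a b => a * 256 + b) 0
      acc ++ PySem.Chars.stripChars (pvHex j) ['0','x']) [])

-- ===== PRECONDITION & SPEC =====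
-- Pre_ excludes lists with a negative entry: there A's while-loop never terminates
-- (i >> 8 stabilises at -1), so A returns on exactly the all-nonnegative lists.
def Pre_re_hash (hash : List Int) : Prop := ∀ i ∈ hash, 0 ≤ i
instance (hash : List Int) : Decidable (Pre_re_hash hash) := by unfold Pre_re_hash; infer_instance

def pvWitness_re_hash : List Int := [0, 255, 305419896]

def Spec_re_hash (hash : List Int) (out : String) : Prop := out = re_hash_alt hash
instance (hash : List Int) (out : String) : Decidable (Spec_re_hash hash out) := by unfold Spec_re_hash; infer_instance

-- ===== CLAIM (what is proved, stated in full; the proofs are below) =====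
def Claim_equal_re_hash : Prop := ∀ (hash : List Int), Dom_re_hash hash → Pre_re_hash hash → Spec_re_hash hash (re_hash hash)

-- ===== LEMMAS AND PROOFS =====

-- number of bytes of i, = (i.bit_length() + 7) // 8
def pvNB (i : Int) : Nat := (PySem.Int.bitLength i + 7) / 8

-- the byte-reversed value: low byte of i becomes the most significant of n bytes
def pvGRev (i : Int) : Nat → Int
  | 0 => 0
  | n+1 => PySem.Int.mod i 256 * 256^n + pvGRev (PySem.Int.floordiv i 256) n

lemma pvShiftL (j : Int) : j <<< (8:Nat) = j * 256 := by simp [Int.shiftLeft_eq]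

lemma pvShiftR (j : Int) : j >>> (8:Nat) = j / 256 := by simp [Int.shiftRight_eq_div_pow]

lemma pvFD (i : Int) : PySem.Int.floordiv i 256 = i / 256 :=
  PySem.Int.floordiv_eq_ediv_of_pos (by norm_num)

-- B's Horner fold over the little-endian bytes is pvGRev
lemma pvB1 : ∀ (n : Nat) (a i : Int),
    (pvBytesLE i n).foldl (fun a b => a * 256 + b) a = a * 256^n + pvGRev i n := by
  intro n
  induction n with
  | zero => intro a i; simp [pvBytesLE, pvGRev]
  | succ n ih =>
    intro a i
    simp only [pvBytesLE, pvGRev, List.foldl_cons, ih]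
    ring

-- bit_length is pinned by the power-of-two bracket
lemma pvBLeq {n : Int} {k : Nat} (h1 : 2^k ≤ n.natAbs) (h2 : n.natAbs < 2^(k+1)) :
    PySem.Int.bitLength n = k + 1 := by
  have hne : n ≠ 0 := by
    intro h; subst h; simp at h1
  have hlo := PySem.Int.two_pow_bitLength_le n hne
  have hhi := PySem.Int.lt_two_pow_bitLength n
  set b := PySem.Int.bitLength n with hb
  rcases lt_trichotomy b (k+1) with h | h | h
  · have : (2:Nat)^b ≤ 2^k := Nat.pow_le_pow_right (by norm_num) (by omega)
    omega
  · exact h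
  · have : (2:Nat)^(k+1) ≤ 2^(b-1) := Nat.pow_le_pow_right (by norm_num) (by omega)
    omega

-- one division by 256 drops the byte count by exactly one
lemma pvNBstep (i : Int) (h0 : 0 ≤ i) (hne : i ≠ 0) :
    pvNB i = pvNB (PySem.Int.floordiv i 256) + 1 := by
  obtain ⟨m, rfl⟩ : ∃ m : Nat, i = (m : Int) := ⟨i.toNat, (Int.toNat_of_nonneg h0).symm⟩
  have hm : 0 < m := by omega
  have hlo := PySem.Int.two_pow_bitLength_le (m : Int) hne
  have hhi := PySem.Int.lt_two_pow_bitLength (m : Int)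
  simp only [Int.natAbs_natCast] at hlo hhi
  set b := PySem.Int.bitLength (m : Int) with hb
  have hb1 : 1 ≤ b := by
    by_contra h
    have : b = 0 := by omega
    rw [this] at hhi; omega
  have hfd : PySem.Int.floordiv (m : Int) 256 = ((m / 256 : Nat) : Int) := by
    exact_mod_cast PySem.Int.floordiv_natCast m 256
  by_cases hsmall : m < 256
  · have hb8 : b ≤ 8 := by
      by_contra h
      have : (2:Nat)^8 ≤ 2^(b-1) := Nat.pow_le_pow_right (by norm_num) (by omega)
      omega
    have : m / 256 = 0 := Nat.div_eq_of_lt hsmall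
    rw [hfd, this]
    simp only [pvNB, Nat.cast_zero, PySem.Int.bitLength_zero, ← hb]
    omega
  · replace hsmall : 256 ≤ m := by omega
    have hb9 : 9 ≤ b := by
      by_contra h
      have : (2:Nat)^b ≤ 2^8 := Nat.pow_le_pow_right (by norm_num) (by omega)
      omega
    obtain ⟨c, hc⟩ : ∃ c, b = c + 9 := ⟨b - 9, by omega⟩
    rw [hc] at hlo hhi
    have hlo' : 2^c ≤ m / 256 := by
      rw [Nat.le_div_iff_mul_le (by norm_num)]
      calc 2^c * 256 = 2^(c+8) := by ring
        _ ≤ m := by simpa using hlo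
    have hhi' : m / 256 < 2^(c+1) := by
      rw [Nat.div_lt_iff_lt_mul (by norm_num)]
      calc m < 2^(c+9) := hhi
        _ = 2^(c+1) * 256 := by ring
    have := pvBLeq (n := ((m / 256 : Nat) : Int)) (k := c)
      (by simpa using hlo') (by simpa using hhi')
    rw [hfd]
    simp only [pvNB, this, ← hb]
    omega

-- A's while-loop, closed form: the byte-reversed value times 256 (plus the shifted accumulator)
lemma pvLoopAeq : ∀ (f : Nat) (i j : Int), 0 ≤ i → i.natAbs < f →
    pvLoopA f i j = if i = 0 then j else j * 256 ^ (pvNB i) + pvGRev i (pvNB i) * 256 := by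
  intro f
  induction f with
  | zero => intro i j _ h; omega
  | succ f ih =>
    intro i j h0 hf
    by_cases hi : i = 0
    · simp [pvLoopA, hi]
    · have hipos : 0 < i := lt_of_le_of_ne h0 (Ne.symm hi)
      have h1 : 0 ≤ i / 256 := Int.ediv_nonneg h0 (by norm_num)
      have h2 : i / 256 < i := by omega
      rw [pvLoopA, if_pos hi, pvShiftR, pvShiftL, ih _ _ h1 (by omega), if_neg hi]
      have hnb : pvNB i = pvNB (i / 256) + 1 := by
        rw [← pvFD]; exact pvNBstep i h0 hi
      have hg : pvGRev i (pvNB i)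
          = PySem.Int.mod i 256 * 256 ^ (pvNB (i / 256)) + pvGRev (i / 256) (pvNB (i / 256)) := by
        rw [hnb, pvGRev, pvFD]
      by_cases hz : i / 256 = 0
      · rw [if_pos hz, hg, hnb, hz]
        simp [pvNB, pvGRev]
        ring
      · rw [if_neg hz, hg, hnb]
        ring

-- per element: A's reversed word equals B's from_bytes/to_bytes value
lemma pvElem (i : Int) (h : 0 ≤ i) :
    pvLoopA (i.natAbs + 1) i 0 >>> (8:Nat)
      = (pvBytesLE i ((PySem.Int.bitLength i + 7) / 8)).foldl (fun a b => a * 256 + b) 0 := by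
  rw [pvB1]
  by_cases hi : i = 0
  · subst hi; decide
  · rw [pvLoopAeq (i.natAbs + 1) i 0 h (by omega), if_neg hi, pvShiftR]
    have h1 : (0:Int) * 256 ^ (pvNB i) + pvGRev i (pvNB i) * 256 = pvGRev i (pvNB i) * 256 := by
      ring
    rw [h1, Int.mul_ediv_cancel _ (by norm_num)]
    show pvGRev i (pvNB i) = 0 * 256 ^ (pvNB i) + pvGRev i (pvNB i)
    ring

-- ===== VERDICT (by name: the statement is the Claim_ definition above) =====
lemma pvFold : ∀ (l : List Int), (∀ i ∈ l, 0 ≤ i) → ∀ acc : List Char,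
    l.foldl (fun acc i =>
      acc ++ PySem.Chars.stripChars (pvHex (pvLoopA (i.natAbs + 1) i 0 >>> (8:Nat))) ['0','x']) acc
    = l.foldl (fun acc i =>
      acc ++ PySem.Chars.stripChars (pvHex ((pvBytesLE i ((PySem.Int.bitLength i + 7) / 8)).foldl (fun a b => a * 256 + b) 0)) ['0','x']) acc := by
  intro l
  induction l with
  | nil => intro _ acc; rfl
  | cons x xs ih =>
    intro hpre acc
    have hx : 0 ≤ x := hpre x (List.mem_cons_self ..)
    simp only [List.foldl_cons, pvElem x hx]
    exact ih (fun i hi => hpre i (List.mem_cons_of_mem _ hi)) _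

theorem re_hash_spec : Claim_equal_re_hash := by
  intro hash _ hpre
  unfold Spec_re_hash re_hash re_hash_alt
  exact congrArg String.ofList (pvFold hash hpre [])
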